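-- pv_equiv track=rewrite | github.com/shreya0626/Infosys_internship | pages/2_📝_My diet plans.py | transform_diet_plan
-- ===== SOURCE A (Python) =====
-- def transform_diet_plan(raw_plan):
--     if not raw_plan:
--         return {"message": "No data available for the selected date."}
--
--     transformed_plan = {}
--
--     # Iterate through weeks and organize the data
--     for week, data in raw_plan.items():
--         days = data.get("Day", [])
--         transformed_plan[week] = {}
--
--         meal_types = ["Breakfast", "Lunch", "Dinner", "Snack"]
--
--         for idx, day in enumerate(days):
--             meals = {
--                 meal_type: data.get(meal_type, [])[idx]
--                 if idx < len(data.get(meal_type, []))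
--                 else "No suggestion"
--                 for meal_type in meal_types
--             }
--             transformed_plan[week][day] = meals
--
--     return transformed_plan
-- ===== SOURCE B (Python) =====
-- def transform_diet_plan(raw_plan):
--     if not raw_plan:
--         return {"message": "No data available for the selected date."}
--
--     transformed_plan = {}
--     for week, data in raw_plan.items():
--         days = data.get("Day", [])
--         n = len(days)
--
--         def col(meal_type):
--             # full column for this meal: pad with "No suggestion", truncate to n
--             return (data.get(meal_type, []) + ["No suggestion"] * n)[:n]
--
--         rows = zip(col("Breakfast"), col("Lunch"), col("Dinner"), col("Snack"))
--         transformed_plan[week] = {}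
--         for day, (b, l, d, s) in zip(days, rows):
--             transformed_plan[week][day] = {
--                 "Breakfast": b, "Lunch": l, "Dinner": d, "Snack": s,
--             }
--     return transformed_plan
-- ===== Notes on version B (the rewrite author's own statement) =====
-- stated objective: alternative
-- what changed: B builds each meal type's full column once (pad with 'No suggestion', truncate to the day count) and zips the four columns with the day list, instead of A's per-day dict comprehension that indexes and bounds-checks each meal list inside the day loop.
import Mathlib
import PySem

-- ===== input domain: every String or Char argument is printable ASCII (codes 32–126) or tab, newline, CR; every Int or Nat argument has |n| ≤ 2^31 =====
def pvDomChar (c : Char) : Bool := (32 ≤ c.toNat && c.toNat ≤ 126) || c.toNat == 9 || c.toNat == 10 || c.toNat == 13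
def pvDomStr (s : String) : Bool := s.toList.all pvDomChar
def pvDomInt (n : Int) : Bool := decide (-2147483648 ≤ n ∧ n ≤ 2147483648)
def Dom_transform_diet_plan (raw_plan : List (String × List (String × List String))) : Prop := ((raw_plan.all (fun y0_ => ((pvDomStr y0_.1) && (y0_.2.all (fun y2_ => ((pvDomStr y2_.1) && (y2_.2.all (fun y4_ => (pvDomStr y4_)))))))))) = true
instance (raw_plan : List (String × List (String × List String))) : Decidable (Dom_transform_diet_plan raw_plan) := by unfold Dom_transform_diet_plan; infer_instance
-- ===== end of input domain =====

-- B builds each meal's full padded/truncated column and zips columns with the day list,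
-- instead of A's per-cell bounds-checked indexing inside the day loop (alternative decomposition, same cost).


-- ===== PORT A =====
-- data.get(meal_type, [])[idx] if idx < len(data.get(meal_type, [])) else "No suggestion"
def pvCellA (data : PySem.Dict String (List String)) (meal_type : String) (idx : Int) : String :=
  if idx < ((data.getD meal_type []).length : Int) then PySem.List.pyGetD (data.getD meal_type []) idx ""
  else "No suggestion"

-- the dict comprehension {meal_type: … for meal_type in meal_types}: a dict built by inserting the
-- four (distinct, literal) keys in order
def pvMealsA (data : PySem.Dict String (List String)) (idx : Int) : PySem.Dict String String :=
  (["Breakfast", "Lunch", "Dinner", "Snack"]).foldl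
    (fun d meal_type => d.insert meal_type (pvCellA data meal_type idx)) PySem.Dict.empty

-- the inner loop: for idx, day in enumerate(days): transformed_plan[week][day] = meals
def pvWeekA (data : PySem.Dict String (List String)) : PySem.Dict String (List (String × String)) :=
  (PySem.List.enumerate (data.getD "Day" [])).foldl
    (fun d p => d.insert p.2 (pvMealsA data p.1).items) PySem.Dict.empty

def transform_diet_plan (raw_plan : List (String × List (String × List String))) : List (String × List (String × List (String × String))) :=
  if raw_plan.isEmpty then []   -- Python returns {"message": …} here: not a value of the return type; excluded by Pre_
  else
    (raw_plan.foldl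
      (fun acc p => acc.insert p.1 (pvWeekA (PySem.Dict.mk p.2)).items)
      PySem.Dict.empty).items

-- ===== PORT B =====
-- col(meal_type) = (data.get(meal_type, []) + ["No suggestion"] * n)[:n]
def pvColB (data : PySem.Dict String (List String)) (meal_type : String) (n : Nat) : List String :=
  (data.getD meal_type [] ++ List.replicate n "No suggestion").take n

-- zip(days, zip(col("Breakfast"), col("Lunch"), col("Dinner"), col("Snack"))), then one dict literal
-- per row (its four keys are the distinct literals, so the dict IS this assoc list)
def pvWeekB (data : PySem.Dict String (List String)) : PySem.Dict String (List (String × String)) :=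
  -- days = data.get("Day", []); n = len(days); rows = zip(col(...), ...) — names inlined
  ((data.getD "Day" []).zip
    ((pvColB data "Breakfast" (data.getD "Day" []).length).zip
      ((pvColB data "Lunch" (data.getD "Day" []).length).zip
        ((pvColB data "Dinner" (data.getD "Day" []).length).zip
          (pvColB data "Snack" (data.getD "Day" []).length))))).foldl
    (fun d p => d.insert p.1
      [("Breakfast", p.2.1), ("Lunch", p.2.2.1), ("Dinner", p.2.2.2.1), ("Snack", p.2.2.2.2)])
    PySem.Dict.empty

def transform_diet_plan_alt (raw_plan : List (String × List (String × List String))) : List (String × List (String × List (String × String))) :=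
  if raw_plan.isEmpty then []   -- Python returns {"message": …} here: not a value of the return type; excluded by Pre_
  else
    (raw_plan.foldl
      (fun acc p => acc.insert p.1 (pvWeekB (PySem.Dict.mk p.2)).items)
      PySem.Dict.empty).items

-- ===== PRECONDITION & SPEC =====
-- On the empty dict both Pythons return {"message": "No data available for the selected date."},
-- a dict[str,str] that is not a value of the declared return type; Pre_ excludes exactly that input.
def Pre_transform_diet_plan (raw_plan : List (String × List (String × List String))) : Prop :=
  raw_plan ≠ []
instance (raw_plan : List (String × List (String × List String))) : Decidable (Pre_transform_diet_plan raw_plan) := by unfold Pre_transform_diet_plan; infer_instance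
def pvWitness_transform_diet_plan : (List (String × List (String × List String))) :=
  [("week1", [("Day", ["Mon", "Tue"]), ("Breakfast", ["eggs"]), ("Lunch", ["soup", "rice", "pie"])])]

def Spec_transform_diet_plan (raw_plan : List (String × List (String × List String))) (out : List (String × List (String × List (String × String)))) : Prop := out = transform_diet_plan_alt raw_plan
instance (raw_plan : List (String × List (String × List String))) (out : List (String × List (String × List (String × String)))) : Decidable (Spec_transform_diet_plan raw_plan out) := by unfold Spec_transform_diet_plan; infer_instance

-- ===== CLAIM (what is proved, stated in full; the proofs are below) =====
def Claim_equal_transform_diet_plan : Prop := ∀ (raw_plan : List (String × List (String × List String))), Dom_transform_diet_plan raw_plan → Pre_transform_diet_plan raw_plan → Spec_transform_diet_plan raw_plan (transform_diet_plan raw_plan)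

-- ===== LEMMAS AND PROOFS =====

-- one cell of B's column
lemma pvColB_getElem (data : PySem.Dict String (List String)) (m : String) (n i : Nat)
    (hi : i < (pvColB data m n).length) :
    (pvColB data m n)[i] =
      (if i < (data.getD m []).length then (data.getD m [])[i]! else "No suggestion") := by
  unfold pvColB
  rw [List.getElem_take, List.getElem_append]
  split
  · simp_all
  · simp_all [List.getElem_replicate]

lemma pvCellA_eq (data : PySem.Dict String (List String)) (m : String) (i : Nat) :
    pvCellA data m (i : Int) =
      (if i < (data.getD m []).length then (data.getD m [])[i]! else "No suggestion") := by
  unfold pvCellA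
  rcases lt_or_ge i (data.getD m []).length with h | h
  · simp [h, PySem.List.pyGetD_natCast, List.getD_eq_getElem?_getD]
  · have : ¬ ((i : Int) < ((data.getD m []).length : Int)) := by exact_mod_cast not_lt.mpr h
    simp [this, not_lt.mpr h]

-- the items of A's four-key meal dict are the four literal pairs (the keys are distinct literals)
lemma pvMealsA_items (data : PySem.Dict String (List String)) (idx : Int) :
    (pvMealsA data idx).items =
      [("Breakfast", pvCellA data "Breakfast" idx), ("Lunch", pvCellA data "Lunch" idx),
       ("Dinner", pvCellA data "Dinner" idx), ("Snack", pvCellA data "Snack" idx)] := by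
  rfl

-- two insert-loops over pair sequences that are equal as lists build the same dict
lemma foldl_insert_eq_of_map_eq {κ ν α β : Type} [BEq κ]
    (l1 : List α) (l2 : List β) (k1 : α → κ) (v1 : α → ν) (k2 : β → κ) (v2 : β → ν)
    (d : PySem.Dict κ ν)
    (h : l1.map (fun x => (k1 x, v1 x)) = l2.map (fun x => (k2 x, v2 x))) :
    l1.foldl (fun d x => d.insert (k1 x) (v1 x)) d =
      l2.foldl (fun d x => d.insert (k2 x) (v2 x)) d := by
  calc l1.foldl (fun d x => d.insert (k1 x) (v1 x)) d
      = (l1.map (fun x => (k1 x, v1 x))).foldl (fun d q => d.insert q.1 q.2) d :=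
        (List.foldl_map (f := fun x => (k1 x, v1 x))
          (g := fun (d : PySem.Dict κ ν) q => d.insert q.1 q.2) (l := l1) (init := d)).symm
    _ = (l2.map (fun x => (k2 x, v2 x))).foldl (fun d q => d.insert q.1 q.2) d := by rw [h]
    _ = l2.foldl (fun d x => d.insert (k2 x) (v2 x)) d :=
        List.foldl_map (f := fun x => (k2 x, v2 x))
          (g := fun (d : PySem.Dict κ ν) q => d.insert q.1 q.2) (l := l2) (init := d)

-- the per-week dicts agree: A's enumerate-and-index loop = B's zip-of-columns loop
lemma pvWeek_eq (data : PySem.Dict String (List String)) : pvWeekA data = pvWeekB data := by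
  unfold pvWeekA pvWeekB
  have hcolLen : ∀ m, (pvColB data m (data.getD "Day" []).length).length =
      (data.getD "Day" []).length := by
    intro m
    simp [pvColB, List.length_take, List.length_append, List.length_replicate]
  refine foldl_insert_eq_of_map_eq _ _ _ _ _ _ _ ?_
  apply List.ext_getElem
  · simp [PySem.List.length_enumerate, List.length_zip, hcolLen]
  · intro i h1 h2
    simp only [List.getElem_map, List.getElem_zip, PySem.List.getElem_enumerate, zero_add]
    rw [pvMealsA_items, pvCellA_eq, pvCellA_eq, pvCellA_eq, pvCellA_eq,
        pvColB_getElem, pvColB_getElem, pvColB_getElem, pvColB_getElem]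

-- ===== VERDICT (by name: the statement is the Claim_ definition above) =====
theorem transform_diet_plan_spec : Claim_equal_transform_diet_plan := by
  intro raw_plan _ _
  unfold Spec_transform_diet_plan transform_diet_plan transform_diet_plan_alt
  simp only [pvWeek_eq]
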